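-- pv_equiv track=rewrite | github.com/grubbylu/AI4Math | generate_hard_problems.py | factorial_base_digit_sum
-- ===== SOURCE A (Python) =====
-- def factorial_base_digit_sum(n):
--     s = 0
--     k = 2
--     while n > 0:
--         s += n % k
--         n //= k
--         k += 1
--     return s
-- ===== SOURCE B (Python) =====
-- def factorial_base_digit_sum(n):
--     if n <= 0:
--         return 0
--     # ascend: find largest k with (k+1)! > n, tracking f = k!
--     k, f = 2, 2
--     while f * (k + 1) <= n:
--         k += 1
--         f *= k
--     # descend: peel digits high-to-low
--     s = 0
--     while k >= 2:
--         s += n // f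
--         n %= f
--         f //= k
--         k -= 1
--     return s + n
-- ===== Notes on version B (the rewrite author's own statement) =====
-- stated objective: alternative
-- what changed: Instead of peeling factorial-base digits low-to-high with an incrementing modulus, B first ascends to the highest factorial scale <= n (tracking the running factorial) and then walks positions high-to-low, extracting each digit by division by the current factorial.
import Mathlib
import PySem

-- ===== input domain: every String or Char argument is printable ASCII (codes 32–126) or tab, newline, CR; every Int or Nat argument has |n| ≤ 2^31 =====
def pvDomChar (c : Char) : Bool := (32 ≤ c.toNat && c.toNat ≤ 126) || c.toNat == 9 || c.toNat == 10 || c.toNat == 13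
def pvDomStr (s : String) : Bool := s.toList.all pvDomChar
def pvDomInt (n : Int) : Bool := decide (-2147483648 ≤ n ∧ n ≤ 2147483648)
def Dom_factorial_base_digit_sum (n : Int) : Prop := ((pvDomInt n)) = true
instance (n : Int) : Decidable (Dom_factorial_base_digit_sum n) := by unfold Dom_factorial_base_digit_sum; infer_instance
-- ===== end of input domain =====

-- B first ascends to the largest factorial scale ≤ n, then extracts digits high-to-low;
-- A peels them low-to-high with an incrementing modulus. Equivalence on all Int inputs.

-- ===== PORT A =====
-- A's while loop; Python's k (always ≥ 2) is carried as j with k = j + 2, so the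
-- divisor is the Nat cast ↑(j+2); PySem floordiv/mod are Python's // and %.
def pvALoop (n : Int) (j : Nat) (s : Int) : Int :=
  if h : 0 < n then
    pvALoop (PySem.Int.floordiv n ((j+2 : Nat) : Int)) (j+1) (s + PySem.Int.mod n ((j+2 : Nat) : Int))
  else s
termination_by n.toNat
decreasing_by
  have hm : n = ((n.toNat : Nat) : Int) := by omega
  rw [hm, PySem.Int.floordiv_natCast]
  simp only [Int.toNat_natCast]
  exact Nat.div_lt_self (by omega) (by omega)

def factorial_base_digit_sum (n : Int) : Int := pvALoop n 0 0

-- ===== PORT B =====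
-- All values in B are nonnegative after the n ≤ 0 guard, so the loops run over Nat
-- (exact: Python // and % on nonnegative ints are Nat / and %). The proof arguments
-- hk, hf only record invariants for termination; they do not alter the computation.

-- ascend: while f*(k+1) <= n: k += 1; f *= k
def pvAscend (n k f : Nat) (hk : 1 ≤ k) (hf : 1 ≤ f) : Nat × Nat :=
  if h : f * (k+1) ≤ n then
    pvAscend n (k+1) (f * (k+1)) (by omega) (Nat.mul_pos hf (by omega))
  else (k, f)
termination_by n - f
decreasing_by
  have h2 : f * (k+1) = f * k + f := by ring
  have h3 : 0 < f * k := Nat.mul_pos hf hk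
  omega

-- descend: while k >= 2: s += n // f; n %= f; f //= k; k -= 1   (returns (s, n))
def pvDescend (k n f s : Nat) : Nat × Nat :=
  if h : 2 ≤ k then pvDescend (k-1) (n % f) (f / k) (s + n / f) else (s, n)
termination_by k
decreasing_by omega

def factorial_base_digit_sum_alt (n : Int) : Int :=
  if n ≤ 0 then 0
  else
    let m := n.toNat
    let kf := pvAscend m 2 2 (by omega) (by omega)
    let sr := pvDescend kf.1 m kf.2 0
    ((sr.1 + sr.2 : Nat) : Int)

-- ===== PRECONDITION & SPEC =====
def Spec_factorial_base_digit_sum (n : Int) (out : Int) : Prop := out = factorial_base_digit_sum_alt n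
instance (n : Int) (out : Int) : Decidable (Spec_factorial_base_digit_sum n out) := by unfold Spec_factorial_base_digit_sum; infer_instance

-- ===== CLAIM (what is proved, stated in full; the proofs are below) =====
def Claim_equal_factorial_base_digit_sum : Prop := ∀ (n : Int), Dom_factorial_base_digit_sum n → Spec_factorial_base_digit_sum n (factorial_base_digit_sum n)

-- ===== LEMMAS AND PROOFS =====

-- Nat-level digit sum A computes: divisors j+2, j+3, ...
def sumA (m j : Nat) : Nat :=
  if h : 0 < m then m % (j+2) + sumA (m / (j+2)) (j+1) else 0
termination_by m
decreasing_by exact Nat.div_lt_self h (by omega)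

-- product (j+2)(j+3)...(j+1+c), built from the right
def stepP (j c : Nat) : Nat :=
  match c with
  | 0 => 1
  | c+1 => stepP j c * (j+2+c)

lemma stepP_pos (j c : Nat) : 0 < stepP j c := by
  induction c with
  | zero => simp [stepP]
  | succ c ih => simp only [stepP]; positivity

lemma stepP_left (j c : Nat) : stepP j (c+1) = (j+2) * stepP (j+1) c := by
  induction c generalizing j with
  | zero => simp [stepP]
  | succ c ih =>
    calc stepP j (c+2) = stepP j (c+1) * (j+2+(c+1)) := rfl
    _ = (j+2) * stepP (j+1) c * (j+2+(c+1)) := by rw [ih]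
    _ = (j+2) * (stepP (j+1) c * ((j+1)+2+c)) := by ring_nf
    _ = (j+2) * stepP (j+1) (c+1) := rfl

lemma sumA_zero (j : Nat) : sumA 0 j = 0 := by
  unfold sumA; simp

lemma sumA_small {d j : Nat} (h : d < j+2) : sumA d j = d := by
  unfold sumA
  rcases Nat.eq_zero_or_pos d with h0 | h0
  · simp [h0]
  · rw [dif_pos h0, Nat.mod_eq_of_lt h, Nat.div_eq_of_lt h, sumA_zero]
    omega

-- splitting: adding d at scale stepP j c contributes the digits of d at offset j+c
lemma sumA_split : ∀ (c j r d : Nat), r < stepP j c →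
    sumA (r + d * stepP j c) j = sumA r j + sumA d (j + c) := by
  intro c
  induction c with
  | zero =>
    intro j r d hr
    simp only [stepP] at hr ⊢
    interval_cases r
    simp [sumA_zero]
  | succ c ih =>
    intro j r d hr
    rw [stepP_left] at hr ⊢
    by_cases hn : 0 < r + d * ((j+2) * stepP (j+1) c)
    · rw [sumA]
      rw [dif_pos hn]
      have hmod : (r + d * ((j+2) * stepP (j+1) c)) % (j+2) = r % (j+2) := by
        conv_lhs => rw [show d * ((j+2) * stepP (j+1) c) = d * stepP (j+1) c * (j+2) by ring]
        rw [Nat.add_mul_mod_self_right]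
      have hdiv : (r + d * ((j+2) * stepP (j+1) c)) / (j+2)
          = r / (j+2) + d * stepP (j+1) c := by
        conv_lhs => rw [show d * ((j+2) * stepP (j+1) c) = d * stepP (j+1) c * (j+2) by ring]
        rw [Nat.add_mul_div_right _ _ (by omega : 0 < j+2)]
      have hrlt : r / (j+2) < stepP (j+1) c := by
        rw [Nat.div_lt_iff_lt_mul (by omega : 0 < j+2)]
        calc r < (j+2) * stepP (j+1) c := hr
        _ = stepP (j+1) c * (j+2) := by ring
      rw [hmod, hdiv, ih (j+1) _ d hrlt]
      have hA : sumA r j = r % (j+2) + sumA (r / (j+2)) (j+1) := by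
        rcases Nat.eq_zero_or_pos r with h0 | h0
        · subst h0; simp [sumA_zero]
        · rw [sumA, dif_pos h0]
      have hje : (j+1) + c = j + (c+1) := by omega
      rw [hA, hje]; ring
    · have hr0 : r = 0 := by omega
      have hd0 : d * ((j+2) * stepP (j+1) c) = 0 := by omega
      have hdz : d = 0 := by
        have := stepP_pos (j+1) c
        rcases Nat.mul_eq_zero.mp hd0 with h | h
        · exact h
        · omega
      subst hr0; subst hdz; simp [sumA_zero]

-- high-to-low digit sum B computes
def sumD (k n : Nat) : Nat :=
  if h : 2 ≤ k then n / stepP 0 (k-1) + sumD (k-1) (n % stepP 0 (k-1)) else n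
termination_by k
decreasing_by omega

lemma stepP_zero_succ (k : Nat) (hk : 1 ≤ k) : stepP 0 k = stepP 0 (k-1) * (k+1) := by
  obtain ⟨c, rfl⟩ : ∃ c, k = c + 1 := ⟨k - 1, by omega⟩
  simp only [Nat.add_sub_cancel]
  calc stepP 0 (c+1) = stepP 0 c * (0+2+c) := rfl
  _ = stepP 0 c * (c+1+1) := by ring_nf

lemma sumD_eq_sumA : ∀ (k n : Nat), n < stepP 0 k → sumD k n = sumA n 0 := by
  intro k
  induction k using Nat.strong_induction_on with
  | _ k ih =>
    intro n hn
    by_cases hk : 2 ≤ k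
    · rw [sumD, dif_pos hk]
      have hk1 : 1 ≤ k - 1 := by omega
      have hsplit : stepP 0 k = stepP 0 (k-1) * (k+1) := stepP_zero_succ k (by omega)
      have hpos : 0 < stepP 0 (k-1) := stepP_pos _ _
      have hd : n / stepP 0 (k-1) < (k-1) + 2 := by
        rw [Nat.div_lt_iff_lt_mul hpos]
        calc n < stepP 0 k := hn
        _ = stepP 0 (k-1) * (k+1) := hsplit
        _ = ((k-1)+2) * stepP 0 (k-1) := by rw [Nat.mul_comm]; congr 1; omega
      have hr : n % stepP 0 (k-1) < stepP 0 (k-1) := Nat.mod_lt _ hpos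
      have hsum := sumA_split (k-1) 0 (n % stepP 0 (k-1)) (n / stepP 0 (k-1)) hr
      rw [Nat.mod_add_div' n (stepP 0 (k-1))] at hsum
      rw [ih (k-1) (by omega) _ hr]
      rw [hsum, Nat.zero_add, sumA_small hd]
      omega
    · rw [sumD, dif_neg hk]
      have hsmall : n < 2 := by
        interval_cases k <;> simp_all [stepP]
      exact (sumA_small (by omega)).symm

-- ascend establishes: result (k', f') has f' = stepP 0 (k'-1), 2 ≤ k', n < f' * (k'+1)
lemma ascend_spec : ∀ (n k f : Nat) (hk : 1 ≤ k) (hf : 1 ≤ f), 2 ≤ k → f = stepP 0 (k-1) →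
    (pvAscend n k f hk hf).2 = stepP 0 ((pvAscend n k f hk hf).1 - 1)
    ∧ 2 ≤ (pvAscend n k f hk hf).1
    ∧ n < (pvAscend n k f hk hf).2 * ((pvAscend n k f hk hf).1 + 1) := by
  intro n k f hk hf
  fun_induction pvAscend with
  | case1 k f hk hf h ih =>
    intro hk2 hinv
    have hinv' : f * (k+1) = stepP 0 ((k+1)-1) := by
      simp only [Nat.add_sub_cancel]
      rw [stepP_zero_succ k (by omega), hinv]
    exact ih (by omega) hinv'
  | case2 k f hk hf h =>
    intro hk2 hinv
    refine ⟨hinv, hk2, ?_⟩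
    show n < f * (k + 1)
    omega

-- descend with f = stepP 0 (k-1) accumulates exactly sumD
lemma descend_spec : ∀ (k n f s : Nat), f = stepP 0 (k-1) →
    (pvDescend k n f s).1 + (pvDescend k n f s).2 = s + sumD k n := by
  intro k
  induction k using Nat.strong_induction_on with
  | _ k ih =>
    intro n f s hf
    by_cases hk : 2 ≤ k
    · rw [pvDescend, dif_pos hk, sumD, dif_pos hk]
      have hfk : f / k = stepP 0 (k-1-1) := by
        have : stepP 0 (k-1) = stepP 0 (k-1-1) * k := by
          have := stepP_zero_succ (k-1) (by omega)
          rw [this]; congr 1; omega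
        rw [hf, this, Nat.mul_div_cancel _ (by omega : 0 < k)]
      rw [ih (k-1) (by omega) (n % f) (f / k) (s + n / f) hfk]
      rw [hf]; omega
    · rw [pvDescend, dif_neg hk, sumD, dif_neg hk]

-- A's loop computes sumA (over the Nat value)
lemma aloop_eq : ∀ (m j : Nat) (s : Int), pvALoop (m : Int) j s = s + (sumA m j : Int) := by
  intro m
  induction m using Nat.strong_induction_on with
  | _ m ih =>
    intro j s
    rw [pvALoop, sumA]
    by_cases h0 : 0 < m
    · rw [dif_pos (by exact_mod_cast h0), dif_pos h0]
      rw [PySem.Int.floordiv_natCast, PySem.Int.mod_natCast]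
      rw [ih (m / (j+2)) (Nat.div_lt_self h0 (by omega)) (j+1)]
      push_cast; ring
    · rw [dif_neg (by exact_mod_cast h0), dif_neg h0]; simp

-- B's two loops on n.toNat compute sumA (the proof binders h1, h2 match any proof terms)
lemma alt_core (m : Nat) (h1 : 1 ≤ 2) (h2 : 1 ≤ 2) :
    (pvDescend (pvAscend m 2 2 h1 h2).1 m (pvAscend m 2 2 h1 h2).2 0).1
      + (pvDescend (pvAscend m 2 2 h1 h2).1 m (pvAscend m 2 2 h1 h2).2 0).2 = sumA m 0 := by
  obtain ⟨hinv, hk2, hlt⟩ := ascend_spec m 2 2 h1 h2 (by omega) (by simp [stepP])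
  have hd := descend_spec (pvAscend m 2 2 h1 h2).1 m (pvAscend m 2 2 h1 h2).2 0 hinv
  have hstep : (pvAscend m 2 2 h1 h2).2 * ((pvAscend m 2 2 h1 h2).1 + 1)
      = stepP 0 (pvAscend m 2 2 h1 h2).1 := by
    rw [hinv, ← stepP_zero_succ _ (by omega)]
  have hmlt : m < stepP 0 (pvAscend m 2 2 h1 h2).1 := by rw [← hstep]; exact hlt
  rw [sumD_eq_sumA _ m hmlt] at hd
  omega

-- ===== VERDICT (by name: the statement is the Claim_ definition above) =====
theorem factorial_base_digit_sum_spec : Claim_equal_factorial_base_digit_sum := by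
  intro n _
  unfold Spec_factorial_base_digit_sum
  by_cases hpos : 0 < n
  · have hA : factorial_base_digit_sum n = ((sumA n.toNat 0 : Nat) : Int) := by
      unfold factorial_base_digit_sum
      conv_lhs => rw [show n = ((n.toNat : Nat) : Int) by omega]
      rw [aloop_eq]; ring
    rw [hA]
    unfold factorial_base_digit_sum_alt
    rw [if_neg (by omega)]
    exact congrArg Int.ofNat (alt_core n.toNat (by omega) (by omega)).symm
  · have hA : factorial_base_digit_sum n = 0 := by
      unfold factorial_base_digit_sum; rw [pvALoop, dif_neg hpos]
    have hB : factorial_base_digit_sum_alt n = 0 := by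
      unfold factorial_base_digit_sum_alt; rw [if_pos (by omega)]
    rw [hA, hB]
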